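-- pv_equiv track=rewrite | github.com/Rainburn/Cassandra-Join-Library | utils.py | partition_hash_function
-- ===== SOURCE A (Python) =====
-- K = 15485863
--
-- def partition_hash_function(M): # H1(X) Function
--     # Summing all characters of the input in ASCII Number multiplied by the position of the character in the string
--     # divide the sum with big prime number P, then retrieve the remainder
--
--     # M is input and force convert M to string
--     M = str(M)
--
--     total_sum = 0
--
--     for i in range(len(M)):
--         c = M[i]
--         total_sum += ord(c) * (i+1)
--
--     hash_value = total_sum % K
--
--     return hash_value
-- ===== SOURCE B (Python) =====
-- K = 15485863
--
-- def partition_hash_function(M):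
--     # Position-weighted ASCII sum mod K, computed without any position factor:
--     # iterate over str(M) in reverse keeping a running suffix sum of ord values;
--     # Sum((i+1)*ord(M[i])) equals the sum of all suffix sums.
--     running = 0
--     total = 0
--     for c in reversed(str(M)):
--         running += ord(c)
--         total += running
--     return total % K
-- ===== Notes on version B (the rewrite author's own statement) =====
-- stated objective: alternative
-- what changed: B replaces A's index loop computing ord(c)*(i+1) with a reverse traversal that keeps a running suffix sum of ord values and accumulates it, eliminating the position multiplication.
import Mathlib
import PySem

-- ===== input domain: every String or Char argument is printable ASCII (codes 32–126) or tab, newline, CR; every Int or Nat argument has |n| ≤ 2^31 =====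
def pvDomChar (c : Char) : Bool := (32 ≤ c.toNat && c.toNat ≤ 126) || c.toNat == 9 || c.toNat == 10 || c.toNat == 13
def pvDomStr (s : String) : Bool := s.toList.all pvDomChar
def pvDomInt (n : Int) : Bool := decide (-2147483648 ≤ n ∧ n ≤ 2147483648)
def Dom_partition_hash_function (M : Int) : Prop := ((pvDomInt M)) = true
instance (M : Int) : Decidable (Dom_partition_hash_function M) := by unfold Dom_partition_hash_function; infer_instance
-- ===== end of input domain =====

-- B traverses str(M) in reverse with a running suffix sum of ord values, instead of
-- A's index loop multiplying each ord by its 1-based position; same O(n) cost.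

-- module constant K = 15485863 (shared context of both implementations)
def pvK : Int := 15485863

-- ===== PORT A =====
-- for i in range(len(M)): total_sum += ord(M[i]) * (i+1); return total_sum % K
def partition_hash_function (M : Int) : Int :=
  let Ms : List Char := PySem.Int.toChars M
  let total_sum : Int :=
    (PySem.List.pyRange 0 (Ms.length : Int) 1).foldl
      (fun total_sum i =>
        let c := PySem.List.pyGetD Ms i 'a'  -- index always in range in A's loop
        total_sum + (c.toNat : Int) * (i + 1)) 0
  PySem.Int.mod total_sum pvK

-- ===== PORT B =====
-- reverse traversal: running += ord(c); total += running; return total % K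
def partition_hash_function_alt (M : Int) : Int :=
  let p : Int × Int :=
    (PySem.Int.toChars M).reverse.foldl
      (fun rt c => (rt.1 + (c.toNat : Int), rt.2 + rt.1 + (c.toNat : Int))) (0, 0)
  PySem.Int.mod p.2 pvK

-- ===== PRECONDITION & SPEC =====
def Spec_partition_hash_function (M : Int) (out : Int) : Prop := out = partition_hash_function_alt M
instance (M : Int) (out : Int) : Decidable (Spec_partition_hash_function M out) := by unfold Spec_partition_hash_function; infer_instance

-- ===== CLAIM (what is proved, stated in full; the proofs are below) =====
def Claim_equal_partition_hash_function : Prop := ∀ (M : Int), Dom_partition_hash_function M → Spec_partition_hash_function M (partition_hash_function M)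

-- ===== LEMMAS AND PROOFS =====

/-- Sum of ord values of a list of chars. -/
def pvS : List Char → Int
  | [] => 0
  | c :: t => (c.toNat : Int) + pvS t

/-- Position-weighted ord sum starting at offset `j` (position factor `j+k+1`). -/
def pvT (j : Int) : List Char → Int
  | [] => 0
  | c :: t => (c.toNat : Int) * (j + 1) + pvT (j + 1) t

theorem pvT_shift (l : List Char) : ∀ j : Int, pvT (j + 1) l = pvT j l + pvS l := by
  induction l with
  | nil => intro j; simp [pvT, pvS]
  | cons c t ih => intro j; simp [pvT, pvS, ih (j + 1)]; ring

theorem aFold (l : List Char) : ∀ (j acc : Int),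
    (List.range l.length).foldl
      (fun t k => t + ((l.getD k 'a').toNat : Int) * (j + (k : Int) + 1)) acc
      = acc + pvT j l := by
  induction l with
  | nil => intro j acc; simp [pvT]
  | cons c t ih =>
    intro j acc
    simp only [List.length_cons, List.range_succ_eq_map, List.foldl_cons, List.foldl_map,
      List.getD_cons_zero, List.getD_cons_succ, Nat.cast_zero, Nat.cast_succ]
    rw [show (fun (x : Int) (y : Nat) => x + ((t.getD y 'a').toNat : Int) * (j + ((y : Int) + 1) + 1))
          = (fun (x : Int) (y : Nat) => x + ((t.getD y 'a').toNat : Int) * ((j + 1) + (y : Int) + 1)) by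
        funext x y; ring_nf]
    rw [ih (j + 1)]
    simp [pvT]
    ring

theorem bFold (l : List Char) : ∀ (run tot : Int),
    l.reverse.foldl
      (fun (rt : Int × Int) c => (rt.1 + (c.toNat : Int), rt.2 + rt.1 + (c.toNat : Int)))
      (run, tot)
      = (run + pvS l, tot + pvT 0 l + run * l.length) := by
  induction l with
  | nil => intro run tot; simp [pvS, pvT]
  | cons c t ih =>
    intro run tot
    simp only [List.reverse_cons, List.foldl_append, List.foldl_cons, List.foldl_nil, ih]
    simp only [pvS, pvT, List.length_cons, pvT_shift t 0, Prod.mk.injEq]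
    constructor <;> push_cast <;> ring

theorem partition_hash_function_spec : Claim_equal_partition_hash_function := by
  unfold Claim_equal_partition_hash_function
  intro M _
  unfold Spec_partition_hash_function partition_hash_function partition_hash_function_alt
  set l := PySem.Int.toChars M with hl
  have hA : (PySem.List.pyRange 0 (l.length : Int) 1).foldl
      (fun total_sum i => total_sum + ((PySem.List.pyGetD l i 'a').toNat : Int) * (i + 1)) 0
      = pvT 0 l := by
    rw [PySem.List.pyRange_one]
    simp only [List.foldl_map, sub_zero, Int.toNat_natCast]
    have := aFold l 0 0
    simpa using this
  have hB : (l.reverse.foldl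
      (fun (rt : Int × Int) c => (rt.1 + (c.toNat : Int), rt.2 + rt.1 + (c.toNat : Int)))
      (0, 0)).2 = pvT 0 l := by
    rw [bFold l 0 0]; simp
  simp only []
  rw [hA, hB]
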